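-- pv_equiv track=rewrite | github.com/Hitoshi144/urfu_ddos_bot | helper.py | get_marks
-- ===== SOURCE A (Python) =====
-- def get_marks(marks_str: str):
--     marks = []
--     checkpoint = 0
--     for i in range(len(marks_str) - 1):
--         if marks_str[i].isdigit() and not marks_str[i+1].isdigit():
--             marks.append(marks_str[checkpoint : i+1].strip())
--             checkpoint = i+1
--     return marks
-- ===== SOURCE B (Python) =====
-- def get_marks(marks_str: str):
--     # Run-based scan: consume maximal same-class (digit/non-digit) runs,
--     # accumulating a buffer; flush the stripped buffer after a digit run that
--     # is followed by more text (the trailing segment is never emitted).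
--     def split_run(d, s):
--         for k, ch in enumerate(s):
--             if ch.isdigit() != d:
--                 return s[:k], s[k:]
--         return s, ''
--
--     out = []
--     buf = ''
--     s = marks_str
--     while s:
--         d = s[0].isdigit()
--         run, rest = split_run(d, s[1:])
--         buf = buf + s[0] + run
--         if d and rest:
--             out.append(buf.strip())
--             buf = ''
--         s = rest
--     return out
-- ===== Notes on version B (the rewrite author's own statement) =====
-- stated objective: alternative
-- what changed: Replaces A's per-index boundary scan with checkpoint slicing by a run-based recursion: consume maximal same-class (digit/non-digit) runs, accumulate them in a buffer, and flush the stripped buffer after each digit run that is followed by more text.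
import Mathlib
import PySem

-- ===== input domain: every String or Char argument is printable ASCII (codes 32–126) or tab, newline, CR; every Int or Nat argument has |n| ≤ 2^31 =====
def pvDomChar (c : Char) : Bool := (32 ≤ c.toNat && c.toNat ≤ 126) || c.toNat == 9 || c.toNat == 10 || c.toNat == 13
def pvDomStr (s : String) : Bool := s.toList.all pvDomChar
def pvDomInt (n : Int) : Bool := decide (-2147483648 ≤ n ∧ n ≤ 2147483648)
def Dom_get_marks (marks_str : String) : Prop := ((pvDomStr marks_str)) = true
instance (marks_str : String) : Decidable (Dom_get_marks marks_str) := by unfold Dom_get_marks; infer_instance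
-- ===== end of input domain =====

-- B replaces A's index loop with a run-based recursion (alternative decomposition, same cost).

-- ===== PORT A =====
-- literal port of A: fold over i in range(len-1), state = (marks, checkpoint)
def aStep (cs : List Char) (st : List String × Int) (i : Int) : List String × Int :=
  if PySem.Chars.isdigit (PySem.List.pyGetD cs i ' ')
      && !(PySem.Chars.isdigit (PySem.List.pyGetD cs (i + 1) ' ')) then
    (st.1 ++ [String.ofList (PySem.Chars.strip (PySem.List.slice cs (some st.2) (some (i + 1))))], i + 1)
  else st

def get_marks (marks_str : String) : List String :=
  let cs := marks_str.toList
  (List.foldl (aStep cs) ([], 0) (PySem.List.pyRange 0 ((cs.length : Int) - 1) 1)).1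

-- ===== PORT B =====
-- split_run d s: longest prefix whose chars have isdigit = d, and the remainder
def runSplit (d : Bool) : List Char → (List Char × List Char)
  | [] => ([], [])
  | c :: cs =>
    if PySem.Chars.isdigit c == d then
      let pr := runSplit d cs
      (c :: pr.1, pr.2)
    else ([], c :: cs)

theorem runSplit_snd_length_le (d : Bool) (cs : List Char) : (runSplit d cs).2.length ≤ cs.length := by
  induction cs with
  | nil => simp [runSplit]
  | cons c cs ih =>
    simp only [runSplit]
    split
    · exact Nat.le_succ_of_le ih
    · simp

-- go buf s of Source B
def altGo (buf : List Char) : List Char → List String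
  | [] => []
  | c :: cs =>
    let d := PySem.Chars.isdigit c
    let pr := runSplit d cs
    let buf' := buf ++ c :: pr.1
    if d && !pr.2.isEmpty then
      String.ofList (PySem.Chars.strip buf') :: altGo [] pr.2
    else altGo buf' pr.2
  termination_by cs => cs.length
  decreasing_by
    · exact Nat.lt_succ_of_le (runSplit_snd_length_le _ _)
    · exact Nat.lt_succ_of_le (runSplit_snd_length_le _ _)

def get_marks_alt (marks_str : String) : List String :=
  altGo [] marks_str.toList

-- ===== PRECONDITION & SPEC =====
def Spec_get_marks (marks_str : String) (out : List String) : Prop := out = get_marks_alt marks_str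
instance (marks_str : String) (out : List String) : Decidable (Spec_get_marks marks_str out) := by unfold Spec_get_marks; infer_instance

-- ===== CLAIM (what is proved, stated in full; the proofs are below) =====
def Claim_equal_get_marks : Prop := ∀ (marks_str : String), Dom_get_marks marks_str → Spec_get_marks marks_str (get_marks marks_str)

-- ===== LEMMAS AND PROOFS =====

-- A's loop, restated as structural recursion: acc = chars since checkpoint
def aRec (acc : List Char) : List Char → List String
  | [] => []
  | [_] => []
  | c1 :: c2 :: rest =>
    if PySem.Chars.isdigit c1 && !(PySem.Chars.isdigit c2) then
      String.ofList (PySem.Chars.strip (acc ++ [c1])) :: aRec [] (c2 :: rest)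
    else aRec (acc ++ [c1]) (c2 :: rest)

-- A's step on Nat indices/checkpoint
def stepN (cs : List Char) (st : List String × Nat) (k : Nat) : List String × Nat :=
  if PySem.Chars.isdigit (cs.getD k ' ') && !(PySem.Chars.isdigit (cs.getD (k + 1) ' ')) then
    (st.1 ++ [String.ofList (PySem.Chars.strip ((cs.drop st.2).take (k + 1 - st.2)))], k + 1)
  else st

theorem aStep_cast (cs : List Char) (marks : List String) (cp k : Nat) :
    aStep cs (marks, (cp : Int)) ((k : Nat) : Int)
      = (fun (p : List String × Nat) => (p.1, (p.2 : Int))) (stepN cs (marks, cp) k) := by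
  have hcast : ((k : Int) + 1) = ((k + 1 : Nat) : Int) := by push_cast; ring
  simp only [aStep, stepN, hcast, PySem.List.pyGetD_natCast, PySem.List.slice_natCast]
  split <;> simp

theorem fold_cast (cs : List Char) (ks : List Nat) : ∀ (marks : List String) (cp : Nat),
    List.foldl (aStep cs) (marks, (cp : Int)) (ks.map (fun k : Nat => (k : Int)))
    = (fun (p : List String × Nat) => (p.1, (p.2 : Int))) (List.foldl (stepN cs) (marks, cp) ks) := by
  induction ks with
  | nil => intro marks cp; simp
  | cons k ks ih =>
    intro marks cp
    rw [List.map_cons, List.foldl_cons, List.foldl_cons, aStep_cast]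
    rcases h : stepN cs (marks, cp) k with ⟨m2, c2⟩
    exact ih m2 c2

theorem main_lemma (cs : List Char) : ∀ (rest q acc : List Char) (marks : List String),
    cs = q ++ rest → acc <:+ q →
    (List.foldl (stepN cs) (marks, q.length - acc.length) (List.range' q.length (rest.length - 1))).1
      = marks ++ aRec acc rest := by
  intro rest
  induction rest with
  | nil => intro q acc marks h hsuf; simp [aRec]
  | cons c1 rest ih =>
    intro q acc marks h hsuf
    cases rest with
    | nil => simp [aRec]
    | cons c2 rest' =>
      obtain ⟨p, hp⟩ := hsuf
      have hplen : q.length = p.length + acc.length := by rw [← hp]; simp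
      have hget1 : cs.getD q.length ' ' = c1 := by
        subst h
        simp [List.getD]
      have hget2 : cs.getD (q.length + 1) ' ' = c2 := by
        subst h
        rw [List.getD, List.getElem?_append_right (by omega)]
        simp [show q.length + 1 - q.length = 1 by omega]
      have hlen : (c1 :: c2 :: rest').length - 1 = rest'.length + 1 := by simp
      rw [hlen, List.range'_succ, List.foldl_cons]
      simp only [stepN, hget1, hget2]
      by_cases hb : (PySem.Chars.isdigit c1 && !PySem.Chars.isdigit c2) = true
      · rw [if_pos hb]
        have hdrop : (cs.drop (q.length - acc.length)).take (q.length + 1 - (q.length - acc.length))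
            = acc ++ [c1] := by
          have h1 : q.length - acc.length = p.length := by omega
          have h2 : q.length + 1 - (q.length - acc.length) = acc.length + 1 := by omega
          rw [h2, h1, h, ← hp, List.append_assoc, List.drop_left, List.take_append,
            List.take_of_length_le (by omega)]
          simp [show acc.length + 1 - acc.length = 1 by omega]
        rw [hdrop]
        have ih' := ih (q ++ [c1]) []
          (marks ++ [String.ofList (PySem.Chars.strip (acc ++ [c1]))])
          (by rw [h]; simp) List.nil_suffix
        simp only [List.length_append, List.length_cons, List.length_nil, Nat.sub_zero, Nat.zero_add, Nat.add_sub_cancel] at ih'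
        rw [ih']
        simp [aRec, hb]
      · rw [if_neg hb]
        have ih' := ih (q ++ [c1]) (acc ++ [c1]) marks
          (by rw [h]; simp)
          ⟨p, by rw [← List.append_assoc, hp]⟩
        simp only [List.length_append, List.length_cons, List.length_nil, Nat.zero_add, Nat.add_sub_cancel] at ih'
        rw [show q.length - acc.length = q.length + 1 - (acc.length + 1) by omega]
        rw [ih']
        simp [aRec, hb]

-- the run recursion computes the same thing as the per-char recursion
theorem run_lemma : ∀ (cs : List Char) (buf : List Char) (c : Char),
    aRec buf (c :: cs) =
      (if PySem.Chars.isdigit c && !(runSplit (PySem.Chars.isdigit c) cs).2.isEmpty then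
        String.ofList (PySem.Chars.strip (buf ++ c :: (runSplit (PySem.Chars.isdigit c) cs).1))
          :: aRec [] (runSplit (PySem.Chars.isdigit c) cs).2
      else aRec (buf ++ c :: (runSplit (PySem.Chars.isdigit c) cs).1)
        (runSplit (PySem.Chars.isdigit c) cs).2) := by
  intro cs
  induction cs with
  | nil => intro buf c; simp [runSplit, aRec]
  | cons c2 cs' ih =>
    intro buf c
    by_cases hsame : PySem.Chars.isdigit c2 = PySem.Chars.isdigit c
    · have hstep : aRec buf (c :: c2 :: cs') = aRec (buf ++ [c]) (c2 :: cs') := by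
        simp only [aRec, hsame]
        rw [if_neg (by cases PySem.Chars.isdigit c <;> simp)]
      rw [hstep, ih (buf ++ [c]) c2]
      simp only [runSplit, hsame, beq_self_eq_true, if_pos]
      simp [List.append_assoc]
    · have hne : (PySem.Chars.isdigit c2 == PySem.Chars.isdigit c) = false := by
        simp [hsame]
      simp only [runSplit, hne, Bool.false_eq_true, if_false]
      have hc2 : PySem.Chars.isdigit c2 = !(PySem.Chars.isdigit c) := by
        cases h1 : PySem.Chars.isdigit c <;> cases h2 : PySem.Chars.isdigit c2 <;> simp_all
      simp only [aRec, hc2, List.isEmpty_cons, Bool.not_false, Bool.not_not, Bool.and_self]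
      cases h1 : PySem.Chars.isdigit c <;> simp

theorem altGo_eq_aRec : ∀ (n : Nat) (cs : List Char), cs.length ≤ n → ∀ buf, altGo buf cs = aRec buf cs := by
  intro n
  induction n with
  | zero =>
    intro cs h buf
    have : cs = [] := by cases cs <;> simp_all
    subst this; simp [altGo, aRec]
  | succ n ih =>
    intro cs h buf
    cases cs with
    | nil => simp [altGo, aRec]
    | cons c cs' =>
      rw [altGo, run_lemma]
      have hlen : (runSplit (PySem.Chars.isdigit c) cs').2.length ≤ n :=
        le_trans (runSplit_snd_length_le _ _) (by simpa using h)
      split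
      · rw [ih _ hlen]
      · rw [ih _ hlen]

theorem get_marks_eq_aRec (s : String) : get_marks s = aRec [] s.toList := by
  have hgm : get_marks s
      = (List.foldl (aStep s.toList) ([], 0) (PySem.List.pyRange 0 ((s.toList.length : Int) - 1) 1)).1 := rfl
  rw [hgm]
  set cs := s.toList with hcs
  have hpr : PySem.List.pyRange 0 ((cs.length : Int) - 1) 1
      = (List.range' 0 (cs.length - 1)).map (fun k : Nat => (k : Int)) := by
    rw [PySem.List.pyRange_one]
    have h1 : (((cs.length : Int) - 1) - 0).toNat = cs.length - 1 := by omega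
    rw [h1, List.range_eq_range']
    apply List.map_congr_left
    intro k _
    simp
  rw [hpr]
  have hfc := fold_cast cs (List.range' 0 (cs.length - 1)) [] 0
  rw [show ((0 : Nat) : Int) = (0 : Int) by simp] at hfc
  rw [hfc]
  have hm := main_lemma cs cs [] [] [] (by simp) List.nil_suffix
  simpa using hm

-- ===== VERDICT (by name: the statement is the Claim_ definition above) =====
theorem get_marks_spec : Claim_equal_get_marks := by
  intro s _
  unfold Spec_get_marks get_marks_alt
  rw [get_marks_eq_aRec, altGo_eq_aRec s.toList.length s.toList (le_refl _)]
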